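-- pv_equiv track=rewrite | github.com/liptonj/hassio-addons | meraki-wpn-portal/backend/app/core/wifi_config.py | generate_wifi_qr_string
-- ===== SOURCE A (Python) =====
-- def generate_wifi_qr_string(
--     ssid: str,
--     passphrase: str,
--     security: str = "WPA",
--     hidden: bool = False,
-- ) -> str:
--     """Generate WiFi QR code string format.
--
--     Format: WIFI:T:<security>;S:<ssid>;P:<password>;H:<hidden>;;
--
--     Parameters
--     ----------
--     ssid : str
--         Network SSID name
--     passphrase : str
--         WiFi password
--     security : str
--         Security type: WPA, WEP, or nopass
--     hidden : bool
--         Whether the network is hidden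
--
--     Returns
--     -------
--     str
--         WiFi QR code string
--     """
--     # Escape special characters in SSID and passphrase
--     def escape_special(value: str) -> str:
--         special_chars = ["\\", ";", ",", ":", '"']
--         for char in special_chars:
--             value = value.replace(char, f"\\{char}")
--         return value
--
--     escaped_ssid = escape_special(ssid)
--     escaped_pass = escape_special(passphrase)
--     hidden_str = "true" if hidden else "false"
--
--     return f"WIFI:T:{security};S:{escaped_ssid};P:{escaped_pass};H:{hidden_str};;"
-- ===== SOURCE B (Python) =====
-- _SPECIAL = {"\\", ";", ",", ":", '"'}
--
--
-- def _escape(value: str) -> str: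
--     # single pass: each special character is prefixed with one backslash
--     return "".join("\\" + c if c in _SPECIAL else c for c in value)
--
--
-- def generate_wifi_qr_string(
--     ssid: str,
--     passphrase: str,
--     security: str = "WPA",
--     hidden: bool = False,
-- ) -> str:
--     hidden_str = "true" if hidden else "false"
--     return f"WIFI:T:{security};S:{_escape(ssid)};P:{_escape(passphrase)};H:{hidden_str};;"
-- ===== Notes on version B (the rewrite author's own statement) =====
-- stated objective: idiomatic
-- what changed: The escape helper is rewritten from five sequential full-string .replace() passes (one per special character) into a single pass over the input's characters that emits '\'+c for characters in the special set, joined with ''.join().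
import Mathlib
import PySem

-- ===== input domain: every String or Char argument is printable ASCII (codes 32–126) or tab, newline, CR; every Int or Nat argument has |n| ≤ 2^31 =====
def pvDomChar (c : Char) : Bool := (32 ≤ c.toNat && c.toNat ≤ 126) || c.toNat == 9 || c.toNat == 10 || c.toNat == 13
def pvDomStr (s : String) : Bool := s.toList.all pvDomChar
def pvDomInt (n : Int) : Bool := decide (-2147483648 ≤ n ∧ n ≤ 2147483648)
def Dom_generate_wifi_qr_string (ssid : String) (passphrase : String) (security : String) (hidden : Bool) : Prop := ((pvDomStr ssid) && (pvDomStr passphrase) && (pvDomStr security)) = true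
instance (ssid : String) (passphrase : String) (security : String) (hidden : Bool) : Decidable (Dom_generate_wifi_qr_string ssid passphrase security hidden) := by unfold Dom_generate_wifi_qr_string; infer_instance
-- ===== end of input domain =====

-- B replaces A's five sequential full-string replace passes in the escape helper
-- by one character-by-character pass over the input (objective: idiomatic).

-- ===== PORT A =====
-- escape_special: loop over the 5 special characters, each doing value.replace(char, "\\" + char)
def escapeSpecialA (value : String) : String :=
  ["\\", ";", ",", ":", "\""].foldl
    (fun v ch => PySem.Str.replace v ch ("\\" ++ ch)) value

def generate_wifi_qr_string (ssid : String) (passphrase : String) (security : String) (hidden : Bool) : String :=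
  let escaped_ssid := escapeSpecialA ssid
  let escaped_pass := escapeSpecialA passphrase
  let hidden_str := if hidden then "true" else "false"
  "WIFI:T:" ++ security ++ ";S:" ++ escaped_ssid ++ ";P:" ++ escaped_pass ++ ";H:" ++ hidden_str ++ ";;"

-- ===== PORT B =====
-- the special set from Source B
def specialB : List Char := PySem.Set.ofList ['\\', ';', ',', ':', '"']

-- _escape: single pass over the characters, '\'+c for special c, joined back
def escapeB (value : String) : String :=
  String.ofList (value.toList.flatMap (fun c => if specialB.contains c then ['\\', c] else [c]))

def generate_wifi_qr_string_alt (ssid : String) (passphrase : String) (security : String) (hidden : Bool) : String :=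
  let hidden_str := if hidden then "true" else "false"
  "WIFI:T:" ++ security ++ ";S:" ++ escapeB ssid ++ ";P:" ++ escapeB passphrase ++ ";H:" ++ hidden_str ++ ";;"

-- ===== PRECONDITION & SPEC =====
def Spec_generate_wifi_qr_string (ssid : String) (passphrase : String) (security : String) (hidden : Bool) (out : String) : Prop := out = generate_wifi_qr_string_alt ssid passphrase security hidden
instance (ssid : String) (passphrase : String) (security : String) (hidden : Bool) (out : String) : Decidable (Spec_generate_wifi_qr_string ssid passphrase security hidden out) := by unfold Spec_generate_wifi_qr_string; infer_instance

-- ===== CLAIM (what is proved, stated in full; the proofs are below) =====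
def Claim_equal_generate_wifi_qr_string : Prop := ∀ (ssid : String) (passphrase : String) (security : String) (hidden : Bool), Dom_generate_wifi_qr_string ssid passphrase security hidden → Spec_generate_wifi_qr_string ssid passphrase security hidden (generate_wifi_qr_string ssid passphrase security hidden)

-- ===== LEMMAS AND PROOFS =====

-- the per-character action of one replace pass with a single-char pattern
def repl1 (a : Char) (ns : List Char) (c : Char) : List Char := if c = a then ns else [c]

theorem replace_go_single (a : Char) (ns : List Char) :
    ∀ (fuel : Nat) (l acc : List Char), l.length ≤ fuel →
      PySem.Chars.replace.go [a] ns fuel l acc = acc.reverse ++ l.flatMap (repl1 a ns) := by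
  intro fuel
  induction fuel with
  | zero =>
    intro l acc h
    have : l = [] := List.eq_nil_of_length_eq_zero (Nat.le_zero.mp h)
    subst this
    simp [PySem.Chars.replace.go]
  | succ n ih =>
    intro l acc h
    cases l with
    | nil => simp [PySem.Chars.replace.go]
    | cons c t =>
      simp only [PySem.Chars.replace.go]
      by_cases hc : c = a
      · subst hc
        have hpre : List.isPrefixOf [c] (c :: t) = true := by
          simp [List.isPrefixOf]
        rw [if_pos hpre]
        simp only [List.length_cons, List.length_nil, List.drop_succ_cons, List.drop_zero]
        have := ih t (ns.reverse ++ acc) (Nat.lt_succ_iff.mp (by simpa using h))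
        rw [this]
        simp [repl1, List.flatMap_cons]
      · have hpre : List.isPrefixOf [a] (c :: t) = false := by
          simp [List.isPrefixOf]
          exact fun hca => (hc hca.symm).elim
        rw [if_neg (by simp [hpre])]
        have := ih t (c :: acc) (Nat.lt_succ_iff.mp (by simpa using h))
        rw [this]
        simp [repl1, hc, List.flatMap_cons]

theorem replace_single (a : Char) (ns l : List Char) :
    PySem.Chars.replace l [a] ns = l.flatMap (repl1 a ns) := by
  have := replace_go_single a ns l.length l [] (le_refl _)
  simpa [PySem.Chars.replace] using this

-- the composed per-character action of the five passes equals B's one-pass action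
theorem composed_action (c : Char) :
    ((((repl1 '\\' ['\\','\\'] c).flatMap (repl1 ';' ['\\',';'])).flatMap
        (repl1 ',' ['\\',','])).flatMap (repl1 ':' ['\\',':'])).flatMap (repl1 '"' ['\\','"'])
      = (if specialB.contains c then ['\\', c] else [c]) := by
  by_cases h1 : c = '\\'; · subst h1; decide
  by_cases h2 : c = ';'; · subst h2; decide
  by_cases h3 : c = ','; · subst h3; decide
  by_cases h4 : c = ':'; · subst h4; decide
  by_cases h5 : c = '"'; · subst h5; decide
  have hsp : specialB = ['\\', ';', ',', ':', '"'] := by decide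
  simp [repl1, hsp, h1, h2, h3, h4, h5]

theorem escape_eq (s : String) : escapeSpecialA s = escapeB s := by
  simp only [escapeSpecialA, escapeB, List.foldl_cons, List.foldl_nil, PySem.Str.replace]
  simp only [String.toList_ofList]
  congr 1
  have e1 : ("\\" : String).toList = ['\\'] := by decide
  have e2 : ("\\" ++ "\\" : String).toList = ['\\','\\'] := by decide
  have e3 : (";" : String).toList = [';'] := by decide
  have e4 : ("\\" ++ ";" : String).toList = ['\\',';'] := by decide
  have e5 : ("," : String).toList = [','] := by decide
  have e6 : ("\\" ++ "," : String).toList = ['\\',','] := by decide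
  have e7 : (":" : String).toList = [':'] := by decide
  have e8 : ("\\" ++ ":" : String).toList = ['\\',':'] := by decide
  have e9 : ("\"" : String).toList = ['"'] := by decide
  have e10 : ("\\" ++ "\"" : String).toList = ['\\','"'] := by decide
  rw [e1, e2, e3, e4, e5, e6, e7, e8, e9, e10]
  rw [replace_single, replace_single, replace_single, replace_single, replace_single]
  rw [List.flatMap_assoc, List.flatMap_assoc, List.flatMap_assoc, List.flatMap_assoc]
  refine List.flatMap_congr (fun c _ => ?_)
  simpa only [List.flatMap_assoc] using composed_action c

-- ===== VERDICT (by name: the statement is the Claim_ definition above) =====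
theorem generate_wifi_qr_string_spec : Claim_equal_generate_wifi_qr_string := by
  intro ssid passphrase security hidden _
  unfold Spec_generate_wifi_qr_string generate_wifi_qr_string generate_wifi_qr_string_alt
  rw [escape_eq, escape_eq]
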